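-- pv_equiv track=rewrite | github.com/tennieskil/advent_of_code_2024 | day_17_part2.py | find_a
-- ===== SOURCE A (Python) =====
-- def find_a(program: tuple[int]) -> int:
--     valid_a = [0]
--     for number in program[::-1]:
--         new_valid_a = []
--         for a in valid_a:
--             for three_bit_combination in range(8):
--                 new_a = a * 8 + three_bit_combination
--                 printed_number = (5 ^ 6 ^ (new_a % 8) ^
--                                   (new_a >> (5 ^ (new_a % 8)))) % 8
--                 if number == printed_number:
--                     new_valid_a.append(new_a)
--         valid_a = new_valid_a
--     return valid_a
-- ===== SOURCE B (Python) =====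
-- def find_a(program):
--     results = []
--
--     def solve(idx, a):
--         if idx < 0:
--             results.append(a)
--             return
--         for combo in range(8):
--             new_a = a * 8 + combo
--             printed = (5 ^ 6 ^ (new_a % 8) ^ (new_a >> (5 ^ (new_a % 8)))) % 8
--             if printed == program[idx]:
--                 solve(idx - 1, new_a)
--
--     solve(len(program) - 1, 0)
--     return results
-- ===== Notes on version B (the rewrite author's own statement) =====
-- stated objective: alternative
-- what changed: B replaces A's breadth-first level-by-level loop (rebuilding a whole candidate list per program digit) by depth-first recursive backtracking solve(idx, a) that extends one candidate at a time from the last program index downward and appends finished candidates to a results list; ascending combos reproduce A's output order exactly.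
import Mathlib
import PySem

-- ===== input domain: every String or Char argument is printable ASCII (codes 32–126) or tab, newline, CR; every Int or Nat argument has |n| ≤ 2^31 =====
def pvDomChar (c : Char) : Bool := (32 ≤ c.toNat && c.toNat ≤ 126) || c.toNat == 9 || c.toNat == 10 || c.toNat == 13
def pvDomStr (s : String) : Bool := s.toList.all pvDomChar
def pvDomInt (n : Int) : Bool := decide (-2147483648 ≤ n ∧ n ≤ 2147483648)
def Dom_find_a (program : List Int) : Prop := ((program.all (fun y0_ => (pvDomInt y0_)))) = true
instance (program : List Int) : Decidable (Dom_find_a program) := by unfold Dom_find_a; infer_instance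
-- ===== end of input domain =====

-- B replaces A's breadth-first level-by-level candidate list by depth-first recursive backtracking; objective: alternative (same cost).

-- ===== PORT A =====
-- shared helper: the printed digit (5 ^ 6 ^ (x % 8) ^ (x >> (5 ^ (x % 8)))) % 8;
-- the shift amount 5 ^ (x % 8) is always in 0..7, so '.toNat' is exact here.
def printedNum (x : Int) : Int :=
  PySem.Int.mod
    (PySem.Int.bxor (PySem.Int.bxor (PySem.Int.bxor 5 6) (PySem.Int.mod x 8))
      (x >>> (PySem.Int.bxor 5 (PySem.Int.mod x 8)).toNat)) 8

def find_a (program : List Int) : List Int :=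
  -- for number in program[::-1]:  (slice with step -1 never fails, so getD [] is exact)
  ((PySem.List.slice? program none none (-1)).getD []).foldl
    (fun valid_a number =>
      valid_a.foldl
        (fun new_valid_a a =>
          (PySem.List.pyRange 0 8 1).foldl
            (fun acc tbc =>
              let new_a := a * 8 + tbc
              if number = printedNum new_a then acc ++ [new_a] else acc)
            new_valid_a)
        [])
    [0]

-- ===== PORT B =====
-- solve(idx, a): fuel = idx + 1 (idx < 0 is fuel = 0); results is the shared
-- accumulator list of Source B, threaded explicitly.  program[idx] is always in
-- range here (idx starts at len-1 and only decreases), so pyGetD is exact.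
def pvSolve (program : List Int) : Nat → Int → List Int → List Int
  | 0, a, results => results ++ [a]
  | Nat.succ idx, a, results =>
    (PySem.List.pyRange 0 8 1).foldl
      (fun acc combo =>
        let new_a := a * 8 + combo
        if printedNum new_a == PySem.List.pyGetD program (idx : Int) 0
        then pvSolve program idx new_a acc else acc)
      results

def find_a_alt (program : List Int) : List Int :=
  pvSolve program program.length 0 []

-- ===== PRECONDITION & SPEC =====
def Spec_find_a (program : List Int) (out : List Int) : Prop := out = find_a_alt program
instance (program : List Int) (out : List Int) : Decidable (Spec_find_a program out) := by unfold Spec_find_a; infer_instance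

-- ===== CLAIM =====
def Claim_equal_find_a : Prop := ∀ (program : List Int), Dom_find_a program → Spec_find_a program (find_a program)

-- ===== LEMMAS AND PROOFS =====

-- the candidates a*8+c whose printed digit is `number`, in ascending combo order
def pvMatches (number a : Int) : List Int :=
  ((PySem.List.pyRange 0 8 1).filter (fun c => printedNum (a * 8 + c) == number)).map
    (fun c => a * 8 + c)

-- leaves of the search tree below `a`, digits processed left to right
def pvDfs : List Int → Int → List Int
  | [], a => [a]
  | d :: rest, a => (pvMatches d a).flatMap (pvDfs rest)

lemma pvInner_eq (l : List Int) (number a : Int) (acc : List Int) :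
    l.foldl
      (fun acc tbc =>
        let new_a := a * 8 + tbc
        if number = printedNum new_a then acc ++ [new_a] else acc) acc
    = acc ++ ((l.filter (fun c => printedNum (a * 8 + c) == number)).map (fun c => a * 8 + c)) := by
  induction l generalizing acc with
  | nil => simp
  | cons x xs ih =>
    simp only [List.foldl_cons]
    rw [ih, List.filter_cons]
    by_cases h : number = printedNum (a * 8 + x)
    · simp [h]
    · have hb : (printedNum (a * 8 + x) == number) = false := by
        simp; exact fun e => h e.symm
      simp [h, hb]

lemma pvLevelA_eq (valid : List Int) (number : Int) (acc : List Int) :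
    valid.foldl
      (fun new_valid_a a =>
        (PySem.List.pyRange 0 8 1).foldl
          (fun acc tbc =>
            let new_a := a * 8 + tbc
            if number = printedNum new_a then acc ++ [new_a] else acc)
          new_valid_a) acc
    = acc ++ valid.flatMap (fun a => pvMatches number a) := by
  induction valid generalizing acc with
  | nil => simp
  | cons a as ih =>
    simp only [List.foldl_cons, List.flatMap_cons]
    rw [pvInner_eq, ih, List.append_assoc]
    rfl

-- A's outer foldl is the breadth-first traversal of the same search tree
lemma pvAloop_eq (ds valid : List Int) :
    ds.foldl
      (fun valid_a number =>
        valid_a.foldl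
          (fun new_valid_a a =>
            (PySem.List.pyRange 0 8 1).foldl
              (fun acc tbc =>
                let new_a := a * 8 + tbc
                if number = printedNum new_a then acc ++ [new_a] else acc)
              new_valid_a) []) valid
    = valid.flatMap (pvDfs ds) := by
  induction ds generalizing valid with
  | nil => simp [pvDfs]
  | cons d rest ih =>
    simp only [List.foldl_cons]
    rw [ih, pvLevelA_eq, List.nil_append, List.flatMap_assoc]
    rfl

-- B's backtracking appends to the accumulator
lemma pvSolve_eq (program : List Int) (k : Nat) (hk : k ≤ program.length) :
    ∀ (a : Int) (results : List Int),
      pvSolve program k a results = results ++ pvDfs ((program.take k).reverse) a := by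
  induction k with
  | zero => intro a results; simp [pvSolve, pvDfs]
  | succ k ih =>
    intro a results
    have hk' : k < program.length := hk
    have htake : (program.take (k + 1)).reverse = program[k] :: (program.take k).reverse := by
      rw [List.take_add_one, List.getElem?_eq_getElem hk']
      simp
    rw [htake]
    show (PySem.List.pyRange 0 8 1).foldl
        (fun acc combo =>
          let new_a := a * 8 + combo
          if printedNum new_a == PySem.List.pyGetD program (k : Int) 0
          then pvSolve program k new_a acc else acc) results
      = results ++ (pvMatches program[k] a).flatMap (pvDfs ((program.take k).reverse))
    have hget : PySem.List.pyGetD program (k : Int) 0 = program[k] := by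
      simp [PySem.List.pyGetD_natCast, List.getD_eq_getElem?_getD, List.getElem?_eq_getElem hk']
    rw [hget]
    -- expand the 8-element range and discharge with the IH for k ≤ length
    have ih' := ih (Nat.le_of_lt hk')
    unfold pvMatches
    induction (PySem.List.pyRange 0 8 1) generalizing results with
    | nil => simp
    | cons c cs ihc =>
      simp only [List.foldl_cons, List.filter_cons]
      by_cases hc : (printedNum (a * 8 + c) == program[k]) = true
      · rw [if_pos hc, ihc (pvSolve program k (a * 8 + c) results), ih', hc]
        simp
      · rw [if_neg hc, ihc results, Bool.eq_false_iff.mpr hc]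
        simp

-- ===== VERDICT =====
theorem find_a_spec : Claim_equal_find_a := by
  intro program _
  show find_a program = find_a_alt program
  simp only [find_a, find_a_alt, PySem.List.slice?_none_none_neg_one, Option.getD_some]
  rw [pvAloop_eq, pvSolve_eq program program.length (Nat.le_refl _), List.take_length]
  simp
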